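-- pv_equiv track=rewrite | github.com/ISSMteam/ISSM | src/m/miscellaneous/parallelrange.py | parallelrange
-- ===== SOURCE A (Python) =====
-- def parallelrange(rank, numprocs, globalsize):
--     """
--     PARALLELRANGE - from a rank, and a number of processors, figure out a range, for parallel tasks.
--
--        Usage:
--           i1, i2 = parallelrange(rank, numprocs, globalsize)
--     """
--
--     #We use floor. we under distribute rows. The rows left are then redistributed, therefore resulting in a more even distribution.
--     num_local_rows = [int(globalsize / numprocs) for i in range(numprocs)]
--
--     #There may be some rows left. Distribute evenly.
--     row_rest = globalsize - numprocs * int(globalsize / numprocs)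
--
--     for i in range(row_rest):
--         num_local_rows[i] = num_local_rows[i] + 1
--
--     i1 = 0
--     for i in range(rank - 1):
--         i1 += num_local_rows[i]
--     i2 = i1 + num_local_rows[rank - 1] - 1
--
--     return i1, i2
-- ===== SOURCE B (Python) =====
-- def parallelrange(rank, numprocs, globalsize):
--     """Closed-form O(1) version: no per-processor list, no loops.
--
--     rank is a 1-based processor rank, validated explicitly.
--     q is the per-row base count (truncated quotient, exactly as A computes it);
--     r is the number of leftover rows to redistribute (none when it is negative).
--     """
--     if not 1 <= rank <= numprocs:
--         raise ValueError("rank must be between 1 and numprocs")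
--     q = int(globalsize / numprocs)
--     r = max(globalsize - numprocs * q, 0)
--     i1 = (rank - 1) * q + min(rank - 1, r)
--     i2 = i1 + q + (1 if rank - 1 < r else 0) - 1
--     return i1, i2
-- ===== Notes on version B (the rewrite author's own statement) =====
-- stated objective: faster
-- what changed: Replaces A's construction of a numprocs-long row list, the redistribution loop and the O(rank) prefix-sum loop with closed-form arithmetic: i1 = (rank-1)*q + min(rank-1, r) and i2 directly from q and r.
-- outside the precondition, e.g. on parallelrange(0, 4, 10): A returns (0, 1), B raises ValueError; on parallelrange(-2, 4, 10): A returns (0, 2), B raises ValueError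
import Mathlib
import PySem

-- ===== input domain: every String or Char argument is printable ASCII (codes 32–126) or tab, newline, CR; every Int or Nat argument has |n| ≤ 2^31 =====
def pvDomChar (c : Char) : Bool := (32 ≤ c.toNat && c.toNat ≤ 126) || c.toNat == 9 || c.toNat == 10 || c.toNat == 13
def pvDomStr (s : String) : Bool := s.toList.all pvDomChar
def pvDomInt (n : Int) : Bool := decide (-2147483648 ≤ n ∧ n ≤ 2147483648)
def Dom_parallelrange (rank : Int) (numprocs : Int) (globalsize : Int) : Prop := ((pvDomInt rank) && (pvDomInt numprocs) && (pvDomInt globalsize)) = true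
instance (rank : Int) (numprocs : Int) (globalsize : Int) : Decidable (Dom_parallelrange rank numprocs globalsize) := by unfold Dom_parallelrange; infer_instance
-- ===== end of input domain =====

-- B replaces A's O(numprocs) row-list construction, redistribution loop and O(rank)
-- prefix-sum loop with O(1) closed-form arithmetic (objective: faster).

-- ===== PORT A =====
-- int(globalsize / numprocs) is float true division then int(): truncation toward zero.
-- Hand port: Int.tdiv is exact for it on Dom — the double's rounding error of the quotient is
-- below the distance of a non-integer quotient to any integer whenever |globalsize| < 2^53.
def parallelrange (rank : Int) (numprocs : Int) (globalsize : Int) : List Int :=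
  let q : Int := Int.tdiv globalsize numprocs
  let numLocalRows : List Int := (PySem.List.pyRange 0 numprocs 1).map (fun _ => q)
  let rowRest : Int := globalsize - numprocs * q
  let numLocalRows : List Int :=
    (PySem.List.pyRange 0 rowRest 1).foldl
      (fun l i => PySem.List.pySetD l i (PySem.List.pyGetD l i 0 + 1)) numLocalRows
  let i1 : Int :=
    (PySem.List.pyRange 0 (rank - 1) 1).foldl
      (fun acc i => acc + PySem.List.pyGetD numLocalRows i 0) 0
  let i2 : Int := i1 + PySem.List.pyGetD numLocalRows (rank - 1) 0 - 1
  [i1, i2]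

-- ===== PORT B =====
-- Source B's validation guard raises ValueError outside 1 ≤ rank ≤ numprocs; those inputs are
-- exactly the ones Pre_ excludes (no value to port there).
-- same hand-port of int(globalsize / numprocs) as in A: Int.tdiv (exact on Dom)
def parallelrange_alt (rank : Int) (numprocs : Int) (globalsize : Int) : List Int :=
  let q : Int := Int.tdiv globalsize numprocs
  let r : Int := max (globalsize - numprocs * q) 0
  let i1 : Int := (rank - 1) * q + min (rank - 1) r
  let i2 : Int := i1 + q + (if rank - 1 < r then 1 else 0) - 1
  [i1, i2]

-- ===== PRECONDITION & SPEC =====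
-- Pre_ keeps the ranks the function is for, 1..numprocs (B validates this and raises
-- ValueError outside it): for rank ≤ 0 A still returns, but its value comes from Python's
-- negative-index wraparound into the row list, an accident of A's implementation; for
-- rank > numprocs A raises IndexError (numprocs ≤ 0 raises too).
def Pre_parallelrange (rank : Int) (numprocs : Int) (globalsize : Int) : Prop :=
  1 ≤ rank ∧ rank ≤ numprocs
instance (rank : Int) (numprocs : Int) (globalsize : Int) : Decidable (Pre_parallelrange rank numprocs globalsize) := by unfold Pre_parallelrange; infer_instance

def pvWitness_parallelrange : Int × Int × Int := (2, 4, 10)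

def Spec_parallelrange (rank : Int) (numprocs : Int) (globalsize : Int) (out : List Int) : Prop := out = parallelrange_alt rank numprocs globalsize
instance (rank : Int) (numprocs : Int) (globalsize : Int) (out : List Int) : Decidable (Spec_parallelrange rank numprocs globalsize out) := by unfold Spec_parallelrange; infer_instance

-- ===== CLAIM (what is proved, stated in full; the proofs are below) =====
def Claim_equal_parallelrange : Prop := ∀ (rank : Int) (numprocs : Int) (globalsize : Int), Dom_parallelrange rank numprocs globalsize → Pre_parallelrange rank numprocs globalsize → Spec_parallelrange rank numprocs globalsize (parallelrange rank numprocs globalsize)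

-- ===== LEMMAS AND PROOFS =====

-- After A's redistribution loop: the first R rows hold q+1, the remaining N-R hold q.
lemma pv_rows_after (q : Int) : ∀ (R N : Nat), R ≤ N →
    (List.range R).foldl (fun l i => l.set i (l.getD i 0 + 1)) (List.replicate N q)
      = List.replicate R (q + 1) ++ List.replicate (N - R) q := by
  intro R
  induction R with
  | zero => intro N _; simp
  | succ R ih =>
    intro N hRN
    have hR : R ≤ N := Nat.le_of_succ_le hRN
    rw [List.range_succ, List.foldl_append, ih N hR]
    obtain ⟨k, hk⟩ : ∃ k, N - R = k + 1 := ⟨N - (R + 1), by omega⟩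
    rw [hk]
    simp only [List.foldl_cons, List.foldl_nil]
    have hlen : (List.replicate R (q + 1)).length = R := List.length_replicate
    rw [List.replicate_succ]
    rw [show (q :: List.replicate k q) = [q] ++ List.replicate k q from rfl]
    rw [← List.append_assoc]
    have hgd : ((List.replicate R (q + 1) ++ [q]) ++ List.replicate k q).getD R 0 = q := by
      rw [List.getD_eq_getElem?_getD, List.getElem?_append_left (by simp)]
      simp
    rw [hgd]
    have hset : ((List.replicate R (q + 1) ++ [q]) ++ List.replicate k q).set R (q + 1)
        = (List.replicate R (q + 1) ++ [q + 1]) ++ List.replicate k q := by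
      rw [List.set_append_left _ _ (by simp), List.set_append_right _ _ (by simp)]
      simp
    rw [hset]
    have hk2 : N - (R + 1) = k := by omega
    rw [hk2, ← List.replicate_succ']

-- getD of the redistributed row list.
lemma pv_rows_getD (q : Int) (R N i : Nat) (hRN : R ≤ N) (hiN : i < N) :
    (List.replicate R (q + 1) ++ List.replicate (N - R) q).getD i 0
      = if i < R then q + 1 else q := by
  rw [List.getD_eq_getElem?_getD]
  by_cases h : i < R
  · rw [List.getElem?_append_left (by simpa using h)]
    simp [h]
  · rw [List.getElem?_append_right (by simpa using Nat.le_of_not_lt h)]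
    simp only [List.length_replicate]
    rw [List.getElem?_replicate, if_pos (by omega)]
    simp [h]

-- A's prefix-sum loop over the redistributed rows, in closed form.
lemma pv_prefix_sum (q : Int) (R N : Nat) (hRN : R ≤ N) : ∀ (k : Nat), k ≤ N →
    (List.range k).foldl
        (fun acc i => acc + (List.replicate R (q + 1) ++ List.replicate (N - R) q).getD i 0) 0
      = (k : Int) * q + (min k R : Nat) := by
  intro k
  induction k with
  | zero => intro _; simp
  | succ k ih =>
    intro hkN
    rw [List.range_succ, List.foldl_append, ih (by omega)]
    simp only [List.foldl_cons, List.foldl_nil]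
    rw [pv_rows_getD q R N k hRN (by omega)]
    by_cases h : k < R
    · simp only [if_pos h]
      have : min (k + 1) R = min k R + 1 := by omega
      rw [this]
      push_cast
      ring
    · simp only [if_neg h]
      have : min (k + 1) R = min k R := by omega
      rw [this]
      push_cast
      ring

-- A's whole body in closed form: i1 and i2 from q = tdiv and the clamped remainder.
theorem pv_A_closed (rank numprocs globalsize : Int)
    (hr1 : 1 ≤ rank) (hrn : rank ≤ numprocs) :
    parallelrange rank numprocs globalsize
      = parallelrange_alt rank numprocs globalsize := by
  have hn : 0 < numprocs := lt_of_lt_of_le Int.zero_lt_one (le_trans hr1 hrn)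
  simp only [parallelrange, parallelrange_alt]
  set q : Int := Int.tdiv globalsize numprocs with hqdef
  set r : Int := globalsize - numprocs * q with hrdef
  -- the leftover-row count r is below numprocs (it can be negative when globalsize < 0)
  have hrlt : r < numprocs := by
    have h1 := Int.ediv_add_emod globalsize numprocs
    have h2 : 0 ≤ globalsize % numprocs := Int.emod_nonneg _ (by omega)
    have h3 : globalsize % numprocs < numprocs := Int.emod_lt_of_pos _ hn
    rw [hrdef, hqdef, Int.tdiv_eq_ediv]
    by_cases hg : 0 ≤ globalsize
    · rw [if_pos (Or.inl hg)]; linarith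
    · by_cases hd : numprocs ∣ globalsize
      · rw [if_pos (Or.inr hd)]
        have h4 : globalsize % numprocs = 0 := Int.emod_eq_zero_of_dvd hd
        linarith
      · rw [if_neg (by push_neg; exact ⟨by omega, hd⟩), Int.sign_eq_one_of_pos hn]
        nlinarith
  set N : Nat := numprocs.toNat with hN
  set R : Nat := r.toNat with hR
  have hmaxR : max r 0 = (R : Int) := by omega
  have hRN : R ≤ N := by omega
  -- initial list = replicate
  have hinit : (PySem.List.pyRange 0 numprocs 1).map (fun _ => q) = List.replicate N q := by
    rw [PySem.List.pyRange_one]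
    rw [List.map_map]
    have : (numprocs - 0).toNat = N := by omega
    rw [this]
    simp [List.eq_replicate_iff]
  rw [hinit]
  -- redistribution loop over pyRange = loop over List.range with set/getD
  have hloop : (PySem.List.pyRange 0 r 1).foldl
      (fun l i => PySem.List.pySetD l i (PySem.List.pyGetD l i 0 + 1)) (List.replicate N q)
      = List.replicate R (q + 1) ++ List.replicate (N - R) q := by
    rw [PySem.List.pyRange_one]
    have : (r - 0).toNat = R := by omega
    rw [this, List.foldl_map]
    simp only [zero_add, PySem.List.pySetD_natCast, PySem.List.pyGetD_natCast]
    exact pv_rows_after q R N hRN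
  rw [hloop]
  set rows : List Int := List.replicate R (q + 1) ++ List.replicate (N - R) q with hrows
  have hK : ((rank - 1).toNat : Nat) ≤ N := by omega
  have hsum : (PySem.List.pyRange 0 (rank - 1) 1).foldl
      (fun acc i => acc + PySem.List.pyGetD rows i 0) 0
      = ((rank - 1).toNat : Int) * q + ((min (rank - 1).toNat R : Nat) : Int) := by
    rw [PySem.List.pyRange_one]
    have : (rank - 1 - 0).toNat = (rank - 1).toNat := by omega
    rw [this, List.foldl_map]
    simp only [zero_add, PySem.List.pyGetD_natCast]
    exact pv_prefix_sum q R N hRN (rank - 1).toNat hK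
  rw [hsum]
  -- last row read
  have hlast : PySem.List.pyGetD rows (rank - 1) 0
      = if rank - 1 < max r 0 then q + 1 else q := by
    have h1 : PySem.List.pyGetD rows (rank - 1) 0 = rows.getD (rank - 1).toNat 0 := by
      have := PySem.List.pyGetD_natCast (xs := rows) (n := (rank - 1).toNat) (d := (0 : Int))
      rw [show (((rank - 1).toNat : Int)) = rank - 1 from by omega] at this
      exact this
    rw [h1, hrows, pv_rows_getD q R N (rank - 1).toNat hRN (by omega)]
    by_cases h : rank - 1 < max r 0
    · rw [if_pos (by omega), if_pos h]
    · rw [if_neg (by omega), if_neg h]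
  rw [hlast]
  -- closing arithmetic
  have hmin : ((min (rank - 1).toNat R : Nat) : Int) = min (rank - 1) (max r 0) := by
    omega
  have hcast : ((rank - 1).toNat : Int) = rank - 1 := by omega
  rw [hmin, hcast]
  by_cases h : rank - 1 < max r 0
  · rw [if_pos h, if_pos h]; ring_nf
  · rw [if_neg h, if_neg h]; ring_nf

-- ===== VERDICT (by name: the statement is the Claim_ definition above) =====
theorem parallelrange_spec : Claim_equal_parallelrange := by
  intro rank numprocs globalsize _ hpre
  exact pv_A_closed rank numprocs globalsize hpre.1 hpre.2
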